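-- pv_equiv track=rewrite | github.com/arpie-steele/symbolic-mgu | pmproofs_history/extract_subproofs.py | find_all_subproofs
-- ===== SOURCE A (Python) =====
-- def is_valid_subproof(substring):
--     """
--     Check if a substring is a valid condensed detachment proof.
--
--     A valid proof:
--     - Starts with stack depth 0
--     - Ends with stack depth 1
--     - Never goes negative
--
--     Proof notation (read right-to-left in reverse):
--     - '1', '2', '3': push axiom (stack +1)
--     - 'D': modus ponens (stack -1, pops 2 and pushes 1)
--     """
--     stack_depth = 0
--
--     # Process in reverse (right to left)
--     for char in reversed(substring):
--         if char in '123':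
--             stack_depth += 1
--         elif char == 'D':
--             if stack_depth < 2:
--                 return False  # Not enough items for modus ponens
--             stack_depth -= 1  # Pop 2, push 1 = net -1
--         else:
--             return False  # Invalid character
--
--     return stack_depth == 1
--
-- def find_all_subproofs(proof_string):
--     """
--     Find all valid subproofs within a proof string.
--
--     Returns list of (start_position, length, subproof_string) tuples.
--     """
--     subproofs = []
--     n = len(proof_string)
--
--     # Try all possible substrings
--     for start in range(n):
--         for end in range(start + 1, n + 1):
--             substring = proof_string[start:end]
--
--             # Only check strings with reasonable length (at least one axiom)
--             if len(substring) >= 1 and is_valid_subproof(substring):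
--                 subproofs.append((start, len(substring), substring))
--
--     return subproofs
-- ===== SOURCE B (Python) =====
-- def find_all_subproofs(proof_string):
--     """
--     Find all valid subproofs within a proof string.
--
--     One O(n^2) pass: for each end position, scan the start position downward
--     while maintaining the running stack depth of the reversed-reading check;
--     a failure (bad char, or 'D' without two operands) invalidates every
--     earlier start as well, so the scan breaks there.  Depth 1 marks a valid
--     subproof.  Results are then ordered by (start, length) to match the
--     natural enumeration order.
--     """
--     n = len(proof_string)
--     results = []
--     for end in range(1, n + 1):
--         depth = 0
--         for i in range(end - 1, -1, -1):
--             c = proof_string[i]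
--             if c in '123':
--                 depth += 1
--             elif c == 'D' and depth >= 2:
--                 depth -= 1
--             else:
--                 break
--             if depth == 1:
--                 results.append((i, end - i, proof_string[i:end]))
--     results.sort(key=lambda t: (t[0], t[1]))
--     return results
-- ===== Notes on version B (the rewrite author's own statement) =====
-- stated objective: faster
-- what changed: Replaces the O(n^3) all-substrings enumeration with per-substring revalidation by a single O(n^2) sweep: for each end position one downward scan over starts maintains the running stack depth incrementally and breaks as soon as the check fails (a failure invalidates all earlier starts), then sorts the hits by (start, length).
import Mathlib
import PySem

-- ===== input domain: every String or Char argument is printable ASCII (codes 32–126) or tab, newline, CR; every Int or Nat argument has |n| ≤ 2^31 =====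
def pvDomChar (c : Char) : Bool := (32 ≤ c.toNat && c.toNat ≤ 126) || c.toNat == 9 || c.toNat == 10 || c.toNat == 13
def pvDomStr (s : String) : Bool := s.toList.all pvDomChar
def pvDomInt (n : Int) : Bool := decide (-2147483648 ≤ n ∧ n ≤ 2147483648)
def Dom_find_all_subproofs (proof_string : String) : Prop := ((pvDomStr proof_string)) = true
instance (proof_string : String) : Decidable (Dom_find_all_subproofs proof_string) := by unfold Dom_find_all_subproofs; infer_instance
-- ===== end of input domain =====

-- B replaces A's check-every-substring-from-scratch enumeration by one sweep per end
-- position (a downward scan over starts keeping the running stack depth, breaking on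
-- failure) followed by a sort on (start, length); measurably faster on large inputs.

-- ===== PORT A =====
-- 'char in "123"' is ported as the three-way character comparison (exact for single chars).
def validLoop (chars : List Char) (stack_depth : Int) : Bool :=
  match chars with
  | [] => stack_depth == 1
  | c :: rest =>
    if c == '1' || c == '2' || c == '3' then validLoop rest (stack_depth + 1)
    else if c == 'D' then
      if stack_depth < 2 then false else validLoop rest (stack_depth - 1)
    else false

def is_valid_subproof (substring : String) : Bool :=
  validLoop substring.toList.reverse 0

def find_all_subproofs (proof_string : String) : List (Int × Int × String) :=
  let n := PySem.Str.len proof_string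
  (PySem.List.pyRange 0 n 1).foldl (fun subproofs start =>
    (PySem.List.pyRange (start + 1) (n + 1) 1).foldl (fun subproofs stop =>
      let substring := PySem.Str.slice proof_string (some start) (some stop)
      if decide (1 ≤ PySem.Str.len substring) && is_valid_subproof substring then
        subproofs ++ [(start, PySem.Str.len substring, substring)]
      else subproofs) subproofs) []

-- ===== PORT B =====
-- Inner loop of Source B: scan i downward from stop-1, maintaining the running stack depth;
-- the Python 'break' is the `none` branch of the depth update.  `Str.pyGet?` never
-- misses here (i is always in range; its `none => results` branch is unreachable).
def scanB (s : String) (stop : Int) : List Int → Int → List (Int × Int × String) → List (Int × Int × String)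
  | [], _, results => results
  | i :: rest, depth, results =>
    match PySem.Str.pyGet? s i with
    | none => results
    | some c =>
      match (if c == '1' || c == '2' || c == '3' then some (depth + 1)
             else if c == 'D' && decide (2 ≤ depth) then some (depth - 1)
             else none : Option Int) with
      | none => results
      | some depth =>
        scanB s stop rest depth
          (if depth == 1 then
            results ++ [(i, stop - i, PySem.Str.slice s (some i) (some stop))]
          else results)

def find_all_subproofs_alt (proof_string : String) : List (Int × Int × String) :=
  let n := PySem.Str.len proof_string
  let results := (PySem.List.pyRange 1 (n + 1) 1).foldl
    (fun results stop =>
      scanB proof_string stop (PySem.List.pyRange (stop - 1) (-1) (-1)) 0 results) []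
  PySem.List.sorted2 results (fun t => t.1) (fun t => t.2.1)

-- ===== PRECONDITION & SPEC =====
def Spec_find_all_subproofs (proof_string : String) (out : List (Int × Int × String)) : Prop := out = find_all_subproofs_alt proof_string
instance (proof_string : String) (out : List (Int × Int × String)) : Decidable (Spec_find_all_subproofs proof_string out) := by unfold Spec_find_all_subproofs; infer_instance

-- ===== CLAIM (what is proved, stated in full; the proofs are below) =====
def Claim_equal_find_all_subproofs : Prop := ∀ (proof_string : String), Dom_find_all_subproofs proof_string → Spec_find_all_subproofs proof_string (find_all_subproofs proof_string)

-- ===== LEMMAS AND PROOFS =====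

-- The one-character step of the reversed-reading stack-depth check; `none` = failure.
def pvStep (c : Char) (d : Int) : Option Int :=
  if c == '1' || c == '2' || c == '3' then some (d + 1)
  else if c == 'D' && decide (2 ≤ d) then some (d - 1)
  else none

-- Running the check over a whole character list.
def pvG : List Char → Int → Option Int
  | [], d => some d
  | c :: r, d => match pvStep c d with
    | none => none
    | some d' => pvG r d'

-- The character segment [i, e) of the string.
def pvSeg (s : String) (i e : Nat) : List Char := (s.toList.drop i).take (e - i)

-- A's entry for the substring [i, e).
def pvEnt (s : String) (i e : Int) : Int × Int × String :=
  (i, e - i, PySem.Str.slice s (some i) (some e))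

-- Validity of the substring [i, e) as a subproof.
def pvValid (s : String) (i e : Int) : Bool :=
  decide (pvG (PySem.Str.slice s (some i) (some e)).toList.reverse 0 = some 1)

-- The comparison sorted2 uses on the key pair ((·.1), (·.2.1)).
def pvBefore (a b : Int × Int × String) : Bool :=
  decide (a.1 < b.1) || (!decide (b.1 < a.1) && decide (a.2.1 < b.2.1))

-- Canonical form of A's output: starts ascending, ends ascending.
def pvCanA (s : String) : List (Int × Int × String) :=
  (PySem.List.pyRange 0 (PySem.Str.len s) 1).flatMap (fun st =>
    ((PySem.List.pyRange (st + 1) (PySem.Str.len s + 1) 1).filter (fun e => pvValid s st e)).map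
      (fun e => pvEnt s st e))

-- Canonical form of B's pre-sort list: ends ascending, starts descending.
def pvCanB (s : String) : List (Int × Int × String) :=
  (PySem.List.pyRange 1 (PySem.Str.len s + 1) 1).flatMap (fun e =>
    ((PySem.List.pyRange (e - 1) (-1) (-1)).filter (fun i => pvValid s i e)).map
      (fun i => pvEnt s i e))

lemma pvG_append (l₁ l₂ : List Char) (d : Int) :
    pvG (l₁ ++ l₂) d = match pvG l₁ d with
      | none => none
      | some d' => pvG l₂ d' := by
  induction l₁ generalizing d with
  | nil => simp [pvG]
  | cons c r ih =>
    simp only [List.cons_append, pvG]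
    cases pvStep c d with
    | none => rfl
    | some d' => exact ih d'

lemma validLoop_eq (t : List Char) (d : Int) :
    validLoop t d = decide (pvG t d = some 1) := by
  induction t generalizing d with
  | nil =>
    simp only [validLoop, pvG]
    by_cases h : d = 1 <;> simp [h]
  | cons c r ih =>
    by_cases h1 : (c == '1' || c == '2' || c == '3') = true
    · simp [validLoop, pvG, pvStep, h1, ih]
    · by_cases hD : (c == 'D') = true
      · by_cases hd : (2:Int) ≤ d
        · have hlt : ¬ d < 2 := by omega
          simp [validLoop, pvG, pvStep, h1, hD, hd, hlt, ih]
        · have hlt : d < 2 := by omega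
          simp [validLoop, pvG, pvStep, h1, hD, hd, hlt]
      · simp [validLoop, pvG, pvStep, h1, hD]

lemma sliceList (s : String) (i e : Nat) :
    (PySem.Str.slice s (some (i : Int)) (some (e : Int))).toList = pvSeg s i e := by
  rw [PySem.Str.toList_slice, PySem.Chars.slice_eq_listSlice, PySem.List.slice_natCast]
  rfl

lemma pvValid_seg (s : String) (i e : Nat) :
    pvValid s (i : Int) (e : Int) = decide (pvG (pvSeg s i e).reverse 0 = some 1) := by
  rw [pvValid, sliceList]

lemma pvLenI (s : String) (i e : Int) (h0 : 0 ≤ i) (hie : i ≤ e)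
    (he : e ≤ (s.toList.length : Int)) :
    PySem.Str.len (PySem.Str.slice s (some i) (some e)) = e - i := by
  rw [PySem.Str.len_eq, PySem.Str.toList_slice, PySem.Chars.slice_eq_listSlice,
    PySem.List.slice_of_nonneg _ h0 (by omega) (by omega) he]
  simp only [List.length_take, List.length_drop]
  omega

lemma pvSeg_split (s : String) (i m e : Nat) (him : i ≤ m) (hme : m ≤ e) :
    pvSeg s i e = pvSeg s i m ++ pvSeg s m e := by
  unfold pvSeg
  rw [show e - i = (m - i) + (e - m) by omega, List.take_add, List.drop_drop,
    show i + (m - i) = m by omega]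

lemma pvSeg_cons (s : String) (j e : Nat) (hj : j < e) (he : e ≤ s.toList.length) :
    pvSeg s j e = s.toList[j]'(by omega) :: pvSeg s (j + 1) e := by
  rw [pvSeg_split s j (j + 1) e (by omega) (by omega)]
  have : pvSeg s j (j + 1) = [s.toList[j]'(by omega)] := by
    unfold pvSeg
    rw [show j + 1 - j = 1 by omega, List.drop_eq_getElem_cons (by omega : j < s.toList.length)]
    rfl
  rw [this]
  rfl

lemma pvG_fail_mono (s : String) (i j e : Nat) (hij : i ≤ j) (hje : j ≤ e)
    (hfail : pvG (pvSeg s j e).reverse 0 = none) :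
    pvG (pvSeg s i e).reverse 0 = none := by
  rw [pvSeg_split s i j e hij hje, List.reverse_append, pvG_append, hfail]

-- ===== generic: stable insertion sort of a permutation of a strictly ordered list =====

lemma insertBy_all_before {α : Type} (before : α → α → Bool) (x : α) (l : List α)
    (h : ∀ y ∈ l, before x y = true) :
    PySem.List.insertBy before x l = x :: l := by
  cases l with
  | nil => simp [PySem.List.insertBy]
  | cons y t => simp [PySem.List.insertBy, h y (by simp)]

lemma insertBy_filter {α : Type} [DecidableEq α] (before : α → α → Bool)
    (hasym : ∀ a b, before a b = true → before b a = false) :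
    ∀ (ys : List α) (x : α) (q : α → Bool),
      List.Pairwise (fun a b => before a b = true) ys → x ∈ ys → q x = false →
      PySem.List.insertBy before x (ys.filter q)
        = ys.filter (fun z => q z || decide (z = x)) := by
  intro ys
  induction ys with
  | nil => intro x q _ hx _; simp at hx
  | cons y t ih =>
    intro x q hp hx hqx
    have hy : ∀ z ∈ t, before y z = true := (List.pairwise_cons.mp hp).1
    have ht : List.Pairwise (fun a b => before a b = true) t := (List.pairwise_cons.mp hp).2
    by_cases hxy : x = y
    · subst hxy
      have hxt : x ∉ t := by
        intro hmem
        have h1 := hy x hmem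
        have h2 := hasym _ _ h1
        rw [h1] at h2; exact Bool.noConfusion h2
      have hfl : t.filter (fun z => q z || decide (z = x)) = t.filter q := by
        apply List.filter_congr
        intro z hz
        have : ¬ (z = x) := fun h => hxt (h ▸ hz)
        simp [this]
      rw [List.filter_cons, if_neg (by simp [hqx])]
      rw [List.filter_cons]
      simp only [hqx, decide_true, Bool.false_or]
      rw [if_pos trivial, hfl]
      apply insertBy_all_before
      intro z hz
      exact hy z (List.mem_filter.mp hz).1
    · have hxt : x ∈ t := by
        rcases List.mem_cons.mp hx with h | h
        · exact absurd h hxy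
        · exact h
      have hbyx : before y x = true := hy x hxt
      have hbxy : before x y = false := hasym _ _ hbyx
      cases hqy : q y with
      | true =>
        rw [List.filter_cons, if_pos (by simp [hqy])]
        rw [List.filter_cons, if_pos (by simp [hqy])]
        have : PySem.List.insertBy before x (y :: t.filter q)
            = y :: PySem.List.insertBy before x (t.filter q) := by
          simp [PySem.List.insertBy, hbxy]
        rw [this, ih x q ht hxt hqx]
      | false =>
        rw [List.filter_cons, if_neg (by simp [hqy])]
        rw [List.filter_cons, if_neg (by simp [hqy, Ne.symm hxy])]
        exact ih x q ht hxt hqx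

lemma foldl_insertBy_filter {α : Type} [DecidableEq α] (before : α → α → Bool)
    (hasym : ∀ a b, before a b = true → before b a = false) (ys : List α)
    (hp : List.Pairwise (fun a b => before a b = true) ys) :
    ∀ (xs : List α) (q : α → Bool), (∀ x ∈ xs, x ∈ ys) → (∀ x ∈ xs, q x = false) →
      xs.Nodup →
      xs.foldl (fun acc x => PySem.List.insertBy before x acc) (ys.filter q)
        = ys.filter (fun z => q z || xs.contains z) := by
  intro xs
  induction xs with
  | nil =>
    intro q _ _ _
    simp
  | cons x t ih =>
    intro q hmem hq hnd
    rw [List.foldl_cons,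
      insertBy_filter before hasym ys x q hp (hmem x (by simp)) (hq x (by simp))]
    rw [ih (fun z => q z || decide (z = x))
      (fun z hz => hmem z (by simp [hz]))
      (fun z hz => by
        have hzx : z ≠ x := fun h => (List.nodup_cons.mp hnd).1 (h ▸ hz)
        simp [hq z (by simp [hz]), hzx])
      (List.nodup_cons.mp hnd).2]
    apply List.filter_congr
    intro z _
    rw [List.contains_cons]
    have hbeq : (z == x) = decide (z = x) := by
      by_cases h : z = x <;> simp [h]
    rw [hbeq, Bool.or_assoc]

lemma sorted2_eq_of_perm {xs ys : List (Int × Int × String)}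
    (hperm : ys.Perm xs)
    (hp : List.Pairwise (fun a b => pvBefore a b = true) ys) :
    PySem.List.sorted2 xs (fun t => t.1) (fun t => t.2.1) = ys := by
  have hasym : ∀ a b, pvBefore a b = true → pvBefore b a = false := by
    intro a b h
    rw [← Bool.not_eq_true]
    intro hc
    simp only [pvBefore, Bool.or_eq_true, Bool.and_eq_true, Bool.not_eq_true',
      decide_eq_true_eq, decide_eq_false_iff_not] at h hc
    omega
  have hndys : ys.Nodup := by
    refine hp.imp ?_
    intro a b hab hEq
    subst hEq
    have := hasym _ _ hab
    rw [hab] at this; exact Bool.noConfusion this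
  have hndxs : xs.Nodup := hperm.nodup_iff.mp hndys
  have hstart : ([] : List (Int × Int × String)) = ys.filter (fun _ => false) := by simp
  have hfold := foldl_insertBy_filter pvBefore hasym ys hp xs (fun _ => false)
    (fun x hx => hperm.mem_iff.mpr hx) (fun _ _ => rfl) hndxs
  show xs.foldl (fun acc x => PySem.List.insertBy pvBefore x acc) [] = ys
  rw [hstart, hfold]
  rw [List.filter_eq_self]
  intro z hz
  simp [hperm.mem_iff.mp hz]

-- ===== A's port equals its canonical form =====

lemma portA_eq (s : String) : find_all_subproofs s = pvCanA s := by
  show (PySem.List.pyRange 0 (PySem.Str.len s) 1).foldl (fun subproofs start =>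
    (PySem.List.pyRange (start + 1) (PySem.Str.len s + 1) 1).foldl (fun subproofs stop =>
      if decide (1 ≤ PySem.Str.len (PySem.Str.slice s (some start) (some stop)))
          && is_valid_subproof (PySem.Str.slice s (some start) (some stop)) then
        subproofs ++ [(start, PySem.Str.len (PySem.Str.slice s (some start) (some stop)),
          PySem.Str.slice s (some start) (some stop))]
      else subproofs) subproofs) [] = pvCanA s
  have hlen : PySem.Str.len s = (s.toList.length : Int) := PySem.Str.len_eq s
  rw [PySem.List.foldl_congr_mem _ _
    (fun acc st => acc ++
      ((PySem.List.pyRange (st + 1) (PySem.Str.len s + 1) 1).filter (fun e => pvValid s st e)).map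
        (fun e => pvEnt s st e)) []
    ?_]
  · rw [PySem.List.foldl_append_eq_flatMap]
    rfl
  · intro acc st hst
    have hst' := PySem.List.mem_pyRange_one.mp hst
    rw [PySem.List.foldl_append_if
      (fun stop => decide (1 ≤ PySem.Str.len (PySem.Str.slice s (some st) (some stop)))
        && is_valid_subproof (PySem.Str.slice s (some st) (some stop)))
      (fun stop => (st, PySem.Str.len (PySem.Str.slice s (some st) (some stop)),
        PySem.Str.slice s (some st) (some stop)))]
    congr 1
    rw [List.filter_congr (fun e he => ?_)]
    · apply List.map_congr_left
      intro e he
      have he' := PySem.List.mem_pyRange_one.mp (List.mem_filter.mp he).1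
      have hL : PySem.Str.len (PySem.Str.slice s (some st) (some e)) = e - st :=
        pvLenI s st e (by omega) (by omega) (by omega)
      simp only [pvEnt, hL]
    · have he' := PySem.List.mem_pyRange_one.mp he
      have hL : PySem.Str.len (PySem.Str.slice s (some st) (some e)) = e - st :=
        pvLenI s st e (by omega) (by omega) (by omega)
      rw [hL, is_valid_subproof, validLoop_eq]
      have h1 : decide ((1:Int) ≤ e - st) = true := by simp; omega
      rw [h1, Bool.true_and]
      rfl

-- ===== B's scan: characterization =====

lemma scanB_cons_none (s : String) (stop i : Int) (rest : List Int) (depth : Int)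
    (results : List (Int × Int × String)) (c : Char)
    (hc : PySem.Str.pyGet? s i = some c) (hstep : pvStep c depth = none) :
    scanB s stop (i :: rest) depth results = results := by
  simp only [scanB, hc]
  rw [show (if c == '1' || c == '2' || c == '3' then some (depth + 1)
        else if c == 'D' && decide (2 ≤ depth) then some (depth - 1)
        else none : Option Int) = none from hstep]

lemma scanB_cons_some (s : String) (stop i : Int) (rest : List Int) (depth : Int)
    (results : List (Int × Int × String)) (c : Char) (d' : Int)
    (hc : PySem.Str.pyGet? s i = some c) (hstep : pvStep c depth = some d') :
    scanB s stop (i :: rest) depth results =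
      scanB s stop rest d'
        (if d' == 1 then
          results ++ [(i, stop - i, PySem.Str.slice s (some i) (some stop))]
        else results) := by
  simp only [scanB, hc]
  rw [show (if c == '1' || c == '2' || c == '3' then some (depth + 1)
        else if c == 'D' && decide (2 ≤ depth) then some (depth - 1)
        else none : Option Int) = some d' from hstep]

lemma scanB_spec (s : String) (e : Nat) (he : e ≤ s.toList.length) :
    ∀ (j : Nat) (d : Int) (res : List (Int × Int × String)), j < e →
      pvG (pvSeg s (j + 1) e).reverse 0 = some d →
      scanB s (e : Int) (PySem.List.pyRange (j : Int) (-1) (-1)) d res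
        = res ++ ((PySem.List.pyRange (j : Int) (-1) (-1)).filter
              (fun i => pvValid s i (e : Int))).map (fun i => pvEnt s i (e : Int)) := by
  intro j
  induction j with
  | zero =>
    intro d res hje hinv
    rw [PySem.List.pyRange_neg_one_cons (by omega : (-1:Int) < ((0:Nat) : Int))]
    rw [show ((0:Nat) : Int) - 1 = -1 by norm_num,
      PySem.List.pyRange_neg_one_eq_nil (by omega : (-1:Int) ≤ -1)]
    have h0l : 0 < s.toList.length := by omega
    have hc : PySem.Str.pyGet? s ((0:Nat) : Int) = some (s.toList[0]'h0l) := by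
      rw [PySem.Str.pyGet?_natCast, List.getElem?_eq_getElem h0l]
    have hG0 : pvG (pvSeg s 0 e).reverse 0 = pvStep (s.toList[0]'h0l) d := by
      rw [pvSeg_cons s 0 e (by omega) he, List.reverse_cons, pvG_append, hinv]
      simp only [pvG]
      cases pvStep (s.toList[0]'h0l) d <;> rfl
    have hv0 : pvValid s ((0:Nat) : Int) ((e:Nat) : Int)
        = decide (pvStep (s.toList[0]'h0l) d = some 1) := by
      rw [pvValid_seg, hG0]
    cases hstep : pvStep (s.toList[0]'h0l) d with
    | none =>
      rw [scanB_cons_none s ((e:Nat) : Int) ((0:Nat) : Int) [] d res _ hc hstep]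
      rw [List.filter_cons, if_neg (by rw [hv0, hstep]; simp)]
      simp
    | some d' =>
      rw [scanB_cons_some s ((e:Nat) : Int) ((0:Nat) : Int) [] d res _ d' hc hstep]
      by_cases hd1 : d' = 1
      · have hb : (d' == 1) = true := by simp [hd1]
        rw [hb, if_pos rfl]
        rw [List.filter_cons, if_pos (by rw [hv0, hstep, hd1]; simp)]
        simp only [scanB, List.filter_nil, List.map_nil, List.map_cons]
        simp [pvEnt]
      · have hb : (d' == 1) = false := by simp [hd1]
        rw [hb, if_neg (by simp)]
        rw [List.filter_cons, if_neg (by rw [hv0, hstep]; simp [hd1])]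
        simp only [scanB, List.filter_nil, List.map_nil, List.append_nil]
  | succ j ih =>
    intro d res hje hinv
    rw [PySem.List.pyRange_neg_one_cons (by omega : (-1:Int) < ((j+1 : Nat) : Int))]
    rw [show ((j + 1 : Nat) : Int) - 1 = ((j : Nat) : Int) by push_cast; ring]
    have hjl : j + 1 < s.toList.length := by omega
    have hc : PySem.Str.pyGet? s ((j+1:Nat) : Int) = some (s.toList[j+1]'hjl) := by
      rw [PySem.Str.pyGet?_natCast, List.getElem?_eq_getElem hjl]
    have hG0 : pvG (pvSeg s (j+1) e).reverse 0 = pvStep (s.toList[j+1]'hjl) d := by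
      rw [pvSeg_cons s (j+1) e (by omega) he, List.reverse_cons, pvG_append, hinv]
      simp only [pvG]
      cases pvStep (s.toList[j+1]'hjl) d <;> rfl
    have hv0 : pvValid s ((j+1:Nat) : Int) ((e:Nat) : Int)
        = decide (pvStep (s.toList[j+1]'hjl) d = some 1) := by
      rw [pvValid_seg, hG0]
    cases hstep : pvStep (s.toList[j+1]'hjl) d with
    | none =>
      rw [scanB_cons_none s ((e:Nat) : Int) ((j+1:Nat) : Int) _ d res _ hc hstep]
      have hfail : ∀ i : Int, i ∈ PySem.List.pyRange ((j+1:Nat) : Int) (-1) (-1) →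
          pvValid s i ((e:Nat) : Int) = false := by
        intro i hi
        have hi' := PySem.List.mem_pyRange_neg_one.mp hi
        have h0i : 0 ≤ i := by omega
        have hieq : i = ((i.toNat : Nat) : Int) := by omega
        rw [hieq, pvValid_seg]
        have hm := pvG_fail_mono s i.toNat (j+1) e (by omega) (by omega)
          (by rw [hG0, hstep])
        simp [hm]
      rw [List.filter_eq_nil_iff.mpr (by
        intro a ha
        rw [hfail a (by rw [PySem.List.pyRange_neg_one_cons
            (by omega : (-1:Int) < ((j+1 : Nat) : Int)),
          show ((j + 1 : Nat) : Int) - 1 = ((j : Nat) : Int) by push_cast; ring]; exact ha)]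
        simp)]
      simp
    | some d' =>
      rw [scanB_cons_some s ((e:Nat) : Int) ((j+1:Nat) : Int) _ d res _ d' hc hstep]
      rw [ih d' _ (by omega) (hG0.trans hstep)]
      by_cases hd1 : d' = 1
      · have hb : (d' == 1) = true := by simp [hd1]
        rw [hb, if_pos rfl]
        rw [List.filter_cons, if_pos (by rw [hv0, hstep, hd1]; simp)]
        simp only [List.map_cons, List.append_assoc, List.singleton_append]
        simp [pvEnt]
      · have hb : (d' == 1) = false := by simp [hd1]
        rw [hb, if_neg (by simp)]
        rw [List.filter_cons, if_neg (by rw [hv0, hstep]; simp [hd1])]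

lemma portB_eq (s : String) :
    find_all_subproofs_alt s
      = PySem.List.sorted2 (pvCanB s) (fun t => t.1) (fun t => t.2.1) := by
  show PySem.List.sorted2 ((PySem.List.pyRange 1 (PySem.Str.len s + 1) 1).foldl
      (fun results stop =>
        scanB s stop (PySem.List.pyRange (stop - 1) (-1) (-1)) 0 results) [])
      (fun t => t.1) (fun t => t.2.1)
    = PySem.List.sorted2 (pvCanB s) (fun t => t.1) (fun t => t.2.1)
  have hlen : PySem.Str.len s = (s.toList.length : Int) := PySem.Str.len_eq s
  congr 1
  rw [PySem.List.foldl_congr_mem _ _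
    (fun res e => res ++
      ((PySem.List.pyRange (e - 1) (-1) (-1)).filter (fun i => pvValid s i e)).map
        (fun i => pvEnt s i e)) []
    ?_]
  · rw [PySem.List.foldl_append_eq_flatMap]
    rfl
  · intro res e he
    show scanB s e (PySem.List.pyRange (e - 1) (-1) (-1)) 0 res
      = res ++ ((PySem.List.pyRange (e - 1) (-1) (-1)).filter (fun i => pvValid s i e)).map
          (fun i => pvEnt s i e)
    have he' := PySem.List.mem_pyRange_one.mp he
    have hce : ((e.toNat : Nat) : Int) = e := Int.toNat_of_nonneg (by omega)
    rw [← hce]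
    rw [show ((e.toNat : Nat) : Int) - 1 = ((e.toNat - 1 : Nat) : Int) by omega]
    exact scanB_spec s e.toNat (by omega) (e.toNat - 1) 0 res (by omega)
      (by rw [show e.toNat - 1 + 1 = e.toNat by omega]
          simp [pvSeg, pvG])

-- ===== permutation and order =====

lemma pvEnt_eq (s : String) {i e i' e' : Int} (h : pvEnt s i e = pvEnt s i' e') :
    i = i' ∧ e = e' := by
  simp only [pvEnt, Prod.mk.injEq] at h
  omega

lemma canA_nodup (s : String) : (pvCanA s).Nodup := by
  rw [pvCanA, List.nodup_flatMap]
  constructor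
  · intro st _
    apply List.Nodup.map_on
    · intro e he e' he' hent
      exact (pvEnt_eq s hent).2
    · exact (PySem.List.nodup_pyRange_one _ _).filter _
  · refine (PySem.List.pairwise_lt_pyRange_one 0 (PySem.Str.len s)).imp ?_
    intro st st' hlt x hx hx'
    obtain ⟨e, _, rfl⟩ := List.mem_map.mp hx
    obtain ⟨e', _, hent⟩ := List.mem_map.mp hx'
    have := (pvEnt_eq s hent.symm).1
    omega

lemma canB_nodup (s : String) : (pvCanB s).Nodup := by
  rw [pvCanB, List.nodup_flatMap]
  constructor
  · intro e _
    apply List.Nodup.map_on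
    · intro i hi i' hi' hent
      exact (pvEnt_eq s hent).1
    · refine List.Nodup.filter _ ?_
      rw [PySem.List.pyRange_neg_one_eq_reverse, List.nodup_reverse]
      exact PySem.List.nodup_pyRange_one _ _
  · refine (PySem.List.pairwise_lt_pyRange_one 1 (PySem.Str.len s + 1)).imp ?_
    intro e e' hlt x hx hx'
    obtain ⟨i, _, rfl⟩ := List.mem_map.mp hx
    obtain ⟨i', _, hent⟩ := List.mem_map.mp hx'
    have h := pvEnt_eq s hent.symm
    omega

lemma canA_mem_iff (s : String) (x : Int × Int × String) :
    x ∈ pvCanA s ↔ ∃ st e : Int, 0 ≤ st ∧ st < e ∧ e ≤ PySem.Str.len s ∧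
      pvValid s st e = true ∧ x = pvEnt s st e := by
  simp only [pvCanA, List.mem_flatMap, List.mem_map, List.mem_filter,
    PySem.List.mem_pyRange_one]
  constructor
  · rintro ⟨st, ⟨h0, hn⟩, e, ⟨⟨he1, he2⟩, hv⟩, rfl⟩
    exact ⟨st, e, by omega, by omega, by omega, hv, rfl⟩
  · rintro ⟨st, e, h0, hse, hen, hv, rfl⟩
    exact ⟨st, ⟨by omega, by omega⟩, e, ⟨⟨by omega, by omega⟩, hv⟩, rfl⟩

lemma canB_mem_iff (s : String) (x : Int × Int × String) :
    x ∈ pvCanB s ↔ ∃ st e : Int, 0 ≤ st ∧ st < e ∧ e ≤ PySem.Str.len s ∧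
      pvValid s st e = true ∧ x = pvEnt s st e := by
  simp only [pvCanB, List.mem_flatMap, List.mem_map, List.mem_filter,
    PySem.List.mem_pyRange_one, PySem.List.mem_pyRange_neg_one]
  constructor
  · rintro ⟨e, ⟨h1, hn⟩, i, ⟨⟨hi1, hi2⟩, hv⟩, rfl⟩
    exact ⟨i, e, by omega, by omega, by omega, hv, rfl⟩
  · rintro ⟨st, e, h0, hse, hen, hv, rfl⟩
    exact ⟨e, ⟨by omega, by omega⟩, st, ⟨⟨by omega, by omega⟩, hv⟩, rfl⟩

lemma canA_perm_canB (s : String) : (pvCanA s).Perm (pvCanB s) := by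
  rw [List.perm_ext_iff_of_nodup (canA_nodup s) (canB_nodup s)]
  intro x
  rw [canA_mem_iff, canB_mem_iff]

lemma canA_pairwise (s : String) :
    List.Pairwise (fun a b => pvBefore a b = true) (pvCanA s) := by
  rw [pvCanA, List.pairwise_flatMap]
  constructor
  · intro st _
    refine List.Pairwise.map _ ?_
      ((PySem.List.pairwise_lt_pyRange_one (st+1) (PySem.Str.len s + 1)).filter _)
    intro e e' hlt
    simp only [pvBefore, pvEnt, Bool.or_eq_true, Bool.and_eq_true, Bool.not_eq_true',
      decide_eq_true_eq, decide_eq_false_iff_not]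
    omega
  · refine (PySem.List.pairwise_lt_pyRange_one 0 (PySem.Str.len s)).imp ?_
    intro st st' hlt x hx y hy
    obtain ⟨e, _, rfl⟩ := List.mem_map.mp hx
    obtain ⟨e', _, rfl⟩ := List.mem_map.mp hy
    simp only [pvBefore, pvEnt, Bool.or_eq_true, Bool.and_eq_true, Bool.not_eq_true',
      decide_eq_true_eq, decide_eq_false_iff_not]
    omega

-- ===== VERDICT (by name: the statement is the Claim_ definition above) =====
theorem find_all_subproofs_spec : Claim_equal_find_all_subproofs := by
  intro s _
  show find_all_subproofs s = find_all_subproofs_alt s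
  rw [portA_eq, portB_eq, sorted2_eq_of_perm (canA_perm_canB s) (canA_pairwise s)]
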